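-- pv_equiv track=rewrite | github.com/dokyung36d/programmersCodingTest | 부분합.py | checkIntervalAvailable
-- ===== SOURCE A (Python) =====
-- def checkIntervalAvailable(numList, interval, standard):
--     sumValue = getPartSum(numList, 0, interval)
--
--     if sumValue >= standard:
--         return True
--
--     for i in range(interval, len(numList)):
--         deleteNumIndex = i - interval
--         addNumIndex = i
--
--         sumValue -= numList[deleteNumIndex]
--         sumValue += numList[addNumIndex]
--
--         if sumValue >= standard:
--             return True
--
--     return False
--
-- def getPartSum(numList, startIndex, endIndex):
--     # return sum(numList[startIndex:endIndex])
--
--     totalSum = 0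
--     for i in range(startIndex, endIndex):
--         totalSum += numList[i]
--
--     return totalSum
-- ===== SOURCE B (Python) =====
-- def checkIntervalAvailable(numList, interval, standard):
--     prefix = [0]
--     for x in numList:
--         prefix.append(prefix[-1] + x)
--     for s in range(len(numList) - interval + 1):
--         if prefix[s + interval] - prefix[s] >= standard:
--             return True
--     return False
-- ===== Notes on version B (the rewrite author's own statement) =====
-- stated objective: alternative
-- what changed: B builds a prefix-sum table in one pass and tests each window as a difference of two table entries, replacing A's helper-initialised running sum with per-step subtract/add maintenance; same O(n) cost, different decomposition.
-- outside the precondition, e.g. on checkIntervalAvailable([6, -2, -9], -4, -4): A returns True, B returns True; on checkIntervalAvailable([], -3, -12): A returns True, B raises IndexError; on checkIntervalAvailable([0, 2, 3], 4, -10): A raises IndexError, B returns False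
import Mathlib
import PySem

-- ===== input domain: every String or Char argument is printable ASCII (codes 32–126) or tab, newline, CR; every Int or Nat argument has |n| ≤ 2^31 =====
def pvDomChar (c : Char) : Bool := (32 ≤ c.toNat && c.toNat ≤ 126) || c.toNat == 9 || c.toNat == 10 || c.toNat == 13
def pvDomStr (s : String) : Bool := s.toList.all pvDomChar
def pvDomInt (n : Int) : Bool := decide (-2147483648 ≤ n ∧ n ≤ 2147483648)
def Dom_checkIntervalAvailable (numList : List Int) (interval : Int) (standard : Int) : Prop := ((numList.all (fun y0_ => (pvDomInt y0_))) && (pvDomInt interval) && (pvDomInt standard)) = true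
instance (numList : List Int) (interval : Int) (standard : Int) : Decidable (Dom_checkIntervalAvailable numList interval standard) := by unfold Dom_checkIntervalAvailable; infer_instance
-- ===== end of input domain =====

-- B replaces A's running add/subtract window maintenance by a prefix-sum table queried per
-- window start (alternative decomposition, same O(n) cost; equivalent on 0 ≤ interval ≤ len).


-- ===== PORT A =====
-- getPartSum: totalSum accumulated over range(startIndex, endIndex); numList[i] is ported as
-- pyGetD (the default 0 is unreachable inside Pre_, where every accessed index is in range).
def getPartSum (numList : List Int) (startIndex : Int) (endIndex : Int) : Int :=
  (PySem.List.pyRange startIndex endIndex 1).foldl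
    (fun totalSum i => totalSum + PySem.List.pyGetD numList i 0) 0

-- A's for-loop with early return, recursing over the remaining range values and carrying sumValue.
def checkLoopA (numList : List Int) (interval : Int) (standard : Int)
    (is : List Int) (sumValue : Int) : Bool :=
  match is with
  | [] => false
  | i :: rest =>
    let s := sumValue - PySem.List.pyGetD numList (i - interval) 0
                      + PySem.List.pyGetD numList i 0
    if s ≥ standard then true else checkLoopA numList interval standard rest s

def checkIntervalAvailable (numList : List Int) (interval : Int) (standard : Int) : Bool :=
  let sumValue := getPartSum numList 0 interval
  if sumValue ≥ standard then true
  else checkLoopA numList interval standard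
        (PySem.List.pyRange interval (PySem.List.len numList) 1) sumValue

-- ===== PORT B =====
-- prefix.append(prefix[-1] + x): prefix[-1] ported via pyGetD at -1 (list is never empty).
def buildPrefix (numList : List Int) : List Int :=
  numList.foldl (fun pre x => pre ++ [PySem.List.pyGetD pre (-1) 0 + x]) [0]

-- for s in range(len(numList) - interval + 1): return True on first window hit, else False.
def checkIntervalAvailable_alt (numList : List Int) (interval : Int) (standard : Int) : Bool :=
  let pre := buildPrefix numList
  (PySem.List.pyRange 0 (PySem.List.len numList - interval + 1) 1).any
    (fun s => decide (PySem.List.pyGetD pre (s + interval) 0 - PySem.List.pyGetD pre s 0 ≥ standard))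

-- ===== PRECONDITION & SPEC =====
-- Pre_ excludes interval > len(numList), where A raises IndexError in its first loop, and
-- interval < 0, where a window size is meaningless and both programs' outcomes are accidents of
-- index arithmetic (A returns an immediate True whenever standard ≤ 0 and otherwise usually
-- raises IndexError; B wraps or raises depending on the list length).
def Pre_checkIntervalAvailable (numList : List Int) (interval : Int) (standard : Int) : Prop :=
  0 ≤ interval ∧ interval ≤ numList.length

instance (numList : List Int) (interval : Int) (standard : Int) : Decidable (Pre_checkIntervalAvailable numList interval standard) := by unfold Pre_checkIntervalAvailable; infer_instance

def pvWitness_checkIntervalAvailable : List Int × Int × Int := ([3, -1, 4, 1], 2, 5)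

def Spec_checkIntervalAvailable (numList : List Int) (interval : Int) (standard : Int) (out : Bool) : Prop := out = checkIntervalAvailable_alt numList interval standard
instance (numList : List Int) (interval : Int) (standard : Int) (out : Bool) : Decidable (Spec_checkIntervalAvailable numList interval standard out) := by unfold Spec_checkIntervalAvailable; infer_instance

-- ===== CLAIM (what is proved, stated in full; the proofs are below) =====
def Claim_equal_checkIntervalAvailable : Prop := ∀ (numList : List Int) (interval : Int) (standard : Int), Dom_checkIntervalAvailable numList interval standard → Pre_checkIntervalAvailable numList interval standard → Spec_checkIntervalAvailable numList interval standard (checkIntervalAvailable numList interval standard)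

-- ===== LEMMAS AND PROOFS =====

-- prefix sum of the first j elements: the common reference both ports are reduced to
def pvS (xs : List Int) (j : Nat) : Int := (xs.take j).sum

-- membership-aware congruence for List.any (Mathlib's List.any_congr is pointwise on all of α)
theorem pv_any_congr {α : Type} {l : List α} {p q : α → Bool}
    (h : ∀ a ∈ l, p a = q a) : l.any p = l.any q := by
  induction l with
  | nil => rfl
  | cons x xs ih =>
    simp only [List.any_cons, h x (by simp)]
    rw [ih fun a ha => h a (by simp [ha])]

-- buildPrefix's foldl, started from any snapshot p ++ [x0], appends the running sums from x0
theorem buildPrefix_go (xs : List Int) (p : List Int) (x0 : Int) :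
    xs.foldl (fun pre x => pre ++ [PySem.List.pyGetD pre (-1) 0 + x]) (p ++ [x0])
      = p ++ List.scanl (· + ·) x0 xs := by
  induction xs generalizing p x0 with
  | nil => simp [List.scanl]
  | cons x xs ih =>
    simp only [List.foldl_cons, PySem.List.pyGetD_neg_one_append_singleton, List.scanl]
    rw [List.append_assoc] at *
    simpa using ih (p ++ [x0]) (x0 + x)

theorem buildPrefix_eq (xs : List Int) :
    buildPrefix xs = List.scanl (· + ·) 0 xs := by
  simpa using buildPrefix_go xs [] 0

theorem scanl_getElem? (xs : List Int) (a : Int) (j : Nat) (h : j ≤ xs.length) :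
    (List.scanl (· + ·) a xs)[j]? = some (a + pvS xs j) := by
  induction xs generalizing a j with
  | nil =>
    have hj : j = 0 := by simpa using h
    subst hj; simp [pvS]
  | cons x xs ih =>
    cases j with
    | zero => simp [pvS]
    | succ j =>
      rw [List.scanl_cons, List.getElem?_cons_succ]
      rw [ih (a + x) j (by simpa using h)]
      simp [pvS, add_assoc]

theorem buildPrefix_getD (xs : List Int) (j : Nat) (h : j ≤ xs.length) :
    (buildPrefix xs).getD j 0 = pvS xs j := by
  rw [List.getD_eq_getElem?_getD, buildPrefix_eq, scanl_getElem? xs 0 j h]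
  simp

theorem getElem_eq_pvS (xs : List Int) (j : Nat) (h : j < xs.length) :
    xs.getD j 0 = pvS xs (j + 1) - pvS xs j := by
  rw [List.getD_eq_getElem?_getD, List.getElem?_eq_getElem h]
  simp [pvS, List.sum_take_succ xs j h]

-- getPartSum numList 0 k computes the k-th prefix sum
theorem foldl_range_sum (xs : List Int) (k : Nat) (h : k ≤ xs.length) :
    (List.range k).foldl (fun acc j => acc + xs.getD j 0) 0 = pvS xs k := by
  induction k with
  | zero => simp [pvS]
  | succ k ih =>
    rw [List.range_succ, List.foldl_append, ih (by omega)]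
    simp only [List.foldl_cons, List.foldl_nil]
    rw [getElem_eq_pvS xs k (by omega)]
    ring

theorem getPartSum_eq (xs : List Int) (k : Nat) (h : k ≤ xs.length) :
    getPartSum xs 0 (k : Int) = pvS xs k := by
  unfold getPartSum
  rw [PySem.List.pyRange_one]
  simp only [List.foldl_map, sub_zero, Int.toNat_natCast, zero_add,
    PySem.List.pyGetD_natCast]
  exact foldl_range_sum xs k h

-- A's sliding loop, entered at position i with the correct running window sum, tests exactly
-- the windows ending at i+1 … length
theorem checkLoopA_eq (xs : List Int) (k : Nat) (std : Int) (m i : Nat)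
    (hik : k ≤ i) (him : i + m = xs.length) :
    checkLoopA xs (k : Int) std (PySem.List.pyRange (i : Int) (xs.length : Int) 1)
        (pvS xs i - pvS xs (i - k))
      = (List.range m).any (fun t => decide (pvS xs (i + t + 1) - pvS xs (i + t + 1 - k) ≥ std)) := by
  induction m generalizing i with
  | zero =>
    rw [PySem.List.pyRange_one_eq_nil (by omega)]
    simp [checkLoopA]
  | succ m ih =>
    rw [PySem.List.pyRange_one_cons (by exact_mod_cast by omega)]
    simp only [checkLoopA]
    have hcast : (i : Int) - (k : Int) = ((i - k : Nat) : Int) := by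
      push_cast [Nat.cast_sub hik]; ring
    have hstep :
        pvS xs i - pvS xs (i - k) - PySem.List.pyGetD xs ((i : Int) - (k : Int)) 0
          + PySem.List.pyGetD xs (i : Int) 0
        = pvS xs (i + 1) - pvS xs (i + 1 - k) := by
      rw [hcast, PySem.List.pyGetD_natCast, PySem.List.pyGetD_natCast,
        getElem_eq_pvS xs (i - k) (by omega), getElem_eq_pvS xs i (by omega)]
      have : i - k + 1 = i + 1 - k := by omega
      rw [this]; ring
    rw [hstep]
    have hrec := ih (i + 1) (by omega) (by omega)
    have hpush : ((i : Int) + 1) = ((i + 1 : Nat) : Int) := by push_cast; ring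
    rw [List.range_succ_eq_map]
    by_cases hge : pvS xs (i + 1) - pvS xs (i + 1 - k) ≥ std
    · simp [hge]
    · rw [if_neg hge, hpush, hrec]
      simp only [List.any_cons, List.any_map, Nat.add_zero,
        decide_eq_false hge, Bool.false_or]
      apply pv_any_congr
      intro t _
      have e1 : i + 1 + t + 1 = i + (t + 1) + 1 := by omega
      have e2 : i + 1 + t + 1 - k = i + (t + 1) + 1 - k := by omega
      simp [Function.comp, e1]

-- both ports equal the same prefix-sum scan
theorem portA_eq (xs : List Int) (k : Nat) (std : Int) (h : k ≤ xs.length) :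
    checkIntervalAvailable xs (k : Int) std
      = (decide (pvS xs k ≥ std)
          || (List.range (xs.length - k)).any
               (fun t => decide (pvS xs (k + t + 1) - pvS xs (k + t + 1 - k) ≥ std))) := by
  unfold checkIntervalAvailable
  rw [getPartSum_eq xs k h]
  have h0 : pvS xs k = pvS xs k - pvS xs (k - k) := by simp [pvS]
  by_cases hge : pvS xs k ≥ std
  · simp [hge]
  · simp only [if_neg hge, decide_eq_false hge, Bool.false_or, PySem.List.len_eq]
    rw [h0]
    exact checkLoopA_eq xs k std (xs.length - k) k (le_refl k) (by omega)

theorem portB_eq (xs : List Int) (k : Nat) (std : Int) (h : k ≤ xs.length) :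
    checkIntervalAvailable_alt xs (k : Int) std
      = (List.range (xs.length - k + 1)).any
          (fun s => decide (pvS xs (s + k) - pvS xs s ≥ std)) := by
  unfold checkIntervalAvailable_alt
  rw [PySem.List.pyRange_one]
  simp only [PySem.List.len_eq, List.any_map]
  have htn : ((xs.length : Int) - (k : Int) + 1 - 0).toNat = xs.length - k + 1 := by omega
  rw [htn]
  apply pv_any_congr
  intro s hs
  have hs' : s < xs.length - k + 1 := List.mem_range.mp hs
  simp only [Function.comp, zero_add]
  rw [show ((s : Int) + (k : Int)) = ((s + k : Nat) : Int) by push_cast; ring]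
  simp only [PySem.List.pyGetD_natCast]
  rw [buildPrefix_getD xs (s + k) (by omega), buildPrefix_getD xs s (by omega)]

-- ===== VERDICT (by name: the statement is the Claim_ definition above) =====
theorem checkIntervalAvailable_spec : Claim_equal_checkIntervalAvailable := by
  intro numList interval standard _ hpre
  obtain ⟨h0, hle⟩ := hpre
  obtain ⟨k, rfl⟩ := Int.eq_ofNat_of_zero_le h0
  have hk : k ≤ numList.length := by exact_mod_cast hle
  unfold Spec_checkIntervalAvailable
  rw [portA_eq numList k standard hk, portB_eq numList k standard hk]
  rw [List.range_succ_eq_map]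
  simp only [List.any_cons, List.any_map]
  have h0' : pvS numList 0 = 0 := by simp [pvS]
  have hhead : decide (pvS numList k ≥ standard)
      = decide (pvS numList (0 + k) - pvS numList 0 ≥ standard) := by
    simp [h0']
  rw [hhead]
  congr 1
  apply pv_any_congr
  intro t _
  have e1 : Nat.succ t + k = k + t + 1 := by omega
  have e2 : k + t + 1 - k = Nat.succ t := by omega
  simp [Function.comp, e1, e2]
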